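-- pv_equiv track=rewrite | github.com/ZJU-PL/aria | aria/sampling/dtlia/coverage_selector.py | _select_shape_seed_indices
-- ===== SOURCE A (Python) =====
-- from typing import Any, DefaultDict, Dict, List, Optional, Sequence, Set, Tuple
--
-- def _feature_priority(feature: str) -> int:
--     """Return a coarse priority for coverage features."""
--     if feature.startswith("shape:"):
--         return 6
--     if ":min:" in feature or ":max:" in feature:
--         return 5
--     if ":negative:" in feature or ":positive:" in feature or ":zero:" in feature:
--         return 4
--     if ":lower_half:" in feature or ":upper_half:" in feature:
--         return 3
--     if ":interior:" in feature or ":even:" in feature or ":odd:" in feature: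
--         return 2
--     if ":value:" in feature:
--         return 1
--     return 0
--
-- def _priority_signature(features: Set[str]) -> Tuple[int, ...]:
--     """Summarize feature coverage counts by descending priority."""
--     counts = [0] * 7
--     for feature in features:
--         counts[_feature_priority(feature)] += 1
--     return tuple(reversed(counts))
--
-- def _select_shape_seed_indices(
--     candidate_feature_sets: Sequence[Set[str]],
--     num_samples: int,
-- ) -> List[int]:
--     """Seed coverage selection with distinct constructor-shape features."""
--     shape_to_index: Dict[str, int] = {}
--
--     for index, feature_set in enumerate(candidate_feature_sets):
--         shape_features = sorted(
--             feature for feature in feature_set if feature.startswith("shape:")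
--         )
--         if not shape_features:
--             continue
--         shape_feature = shape_features[0]
--         previous_index = shape_to_index.get(shape_feature)
--         if previous_index is None:
--             shape_to_index[shape_feature] = index
--             continue
--
--         current_key = (
--             _priority_signature(feature_set),
--             len(feature_set),
--             -index,
--         )
--         previous_key = (
--             _priority_signature(candidate_feature_sets[previous_index]),
--             len(candidate_feature_sets[previous_index]),
--             -previous_index,
--         )
--         if current_key > previous_key:
--             shape_to_index[shape_feature] = index
--
--     seeded_indices = [
--         index
--         for _, index in sorted(
--             shape_to_index.items(),
--             key=lambda item: (
--                 _priority_signature(candidate_feature_sets[item[1]]),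
--                 len(candidate_feature_sets[item[1]]),
--                 -item[1],
--             ),
--             reverse=True,
--         )
--     ]
--     return seeded_indices[:num_samples]
-- ===== SOURCE B (Python) =====
-- from typing import Dict, List, Sequence, Set, Tuple
--
-- _MARKER_TABLE = [
--     (5, (":min:", ":max:")),
--     (4, (":negative:", ":positive:", ":zero:")),
--     (3, (":lower_half:", ":upper_half:")),
--     (2, (":interior:", ":even:", ":odd:")),
--     (1, (":value:",)),
-- ]
--
-- def _feature_priority(feature: str) -> int:
--     if feature.startswith("shape:"):
--         return 6
--     for priority, markers in _MARKER_TABLE: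
--         if any(marker in feature for marker in markers):
--             return priority
--     return 0
--
-- def _priority_signature(features: Set[str]) -> Tuple[int, ...]:
--     signature = [0] * 7
--     for feature in features:
--         signature[6 - _feature_priority(feature)] += 1
--     return tuple(signature)
--
-- def _select_shape_seed_indices(
--     candidate_feature_sets: Sequence[Set[str]],
--     num_samples: int,
-- ) -> List[int]:
--     # One global sort of all shape-bearing candidates by quality, then a single
--     # dedup scan keeping the first (= best) candidate seen for each shape.
--     order: List[Tuple[int, str]] = []
--     for index, feature_set in enumerate(candidate_feature_sets):
--         shape = None
--         for feature in feature_set: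
--             if feature.startswith("shape:") and (shape is None or feature < shape):
--                 shape = feature
--         if shape is not None:
--             order.append((index, shape))
--
--     order.sort(
--         key=lambda pair: (
--             _priority_signature(candidate_feature_sets[pair[0]]),
--             len(candidate_feature_sets[pair[0]]),
--             -pair[0],
--         ),
--         reverse=True,
--     )
--
--     seen: Set[str] = set()
--     selected: List[int] = []
--     for index, shape in order:
--         if shape not in seen:
--             seen.add(shape)
--             selected.append(index)
--     return selected[:num_samples]
-- ===== Notes on version B (the rewrite author's own statement) =====
-- stated objective: alternative
-- what changed: A keeps a per-shape running-best dict while streaming the candidates and then sorts the surviving winners; B never maintains a best-so-far: it collects (index, minimal-shape) pairs with a running string-minimum, performs ONE global reverse sort of all shape-bearing candidates by the quality key, and emits the answer with a single dedup scan that keeps the first (hence best) index seen per shape, so the per-shape compare-and-overwrite and the second sort disappear.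
import Mathlib
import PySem

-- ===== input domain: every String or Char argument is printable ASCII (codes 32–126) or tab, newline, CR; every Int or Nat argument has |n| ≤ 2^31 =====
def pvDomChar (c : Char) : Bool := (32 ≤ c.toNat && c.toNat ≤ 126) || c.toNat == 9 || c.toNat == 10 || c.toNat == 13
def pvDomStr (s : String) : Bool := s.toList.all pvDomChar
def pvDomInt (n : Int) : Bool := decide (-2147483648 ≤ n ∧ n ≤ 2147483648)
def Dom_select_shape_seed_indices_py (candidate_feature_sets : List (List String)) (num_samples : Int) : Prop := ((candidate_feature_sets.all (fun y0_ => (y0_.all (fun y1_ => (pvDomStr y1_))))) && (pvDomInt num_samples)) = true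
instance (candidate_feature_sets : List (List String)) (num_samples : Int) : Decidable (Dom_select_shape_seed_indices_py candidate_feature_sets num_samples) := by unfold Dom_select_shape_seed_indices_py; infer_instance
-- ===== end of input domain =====

-- B replaces A's streaming per-shape running-best dict (plus a second sort of the winners) by one
-- global reverse sort of all shape-bearing candidates followed by a single first-per-shape dedup scan
-- (alternative algorithm, same result).

-- ===== PORT A =====
-- _feature_priority, literally A's if-chain
def featPriorityA (feature : String) : Int :=
  if PySem.Str.startswith feature "shape:" then 6
  else if PySem.Str.isIn ":min:" feature || PySem.Str.isIn ":max:" feature then 5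
  else if PySem.Str.isIn ":negative:" feature || PySem.Str.isIn ":positive:" feature
          || PySem.Str.isIn ":zero:" feature then 4
  else if PySem.Str.isIn ":lower_half:" feature || PySem.Str.isIn ":upper_half:" feature then 3
  else if PySem.Str.isIn ":interior:" feature || PySem.Str.isIn ":even:" feature
          || PySem.Str.isIn ":odd:" feature then 2
  else if PySem.Str.isIn ":value:" feature then 1
  else 0

-- _priority_signature: counts[_feature_priority(f)] += 1, then tuple(reversed(counts))
def sigA (features : List String) : List Int :=
  (features.foldl
    (fun counts feature =>
      PySem.List.pySetD counts (featPriorityA feature)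
        (PySem.List.pyGetD counts (featPriorityA feature) 0 + 1))
    (List.replicate 7 (0 : Int))).reverse

-- the flattened sort/compare key (_priority_signature(cfs[i]), len(cfs[i]), -i); a 7+2 Int list,
-- lexicographic List-Int order = Python's tuple order here since the signature part has fixed length 7
def keyIdxA (cfs : List (List String)) (i : Int) : List Int :=
  sigA (PySem.List.pyGetD cfs i []) ++ [PySem.List.len (PySem.List.pyGetD cfs i []), -i]

-- the body of A's for-loop (current_key is computed from the feature_set itself, previous_key by indexing)
def stepA (cfs : List (List String)) (d : PySem.Dict String Int) (p : Int × List String) :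
    PySem.Dict String Int :=
  match PySem.List.sorted (p.2.filter (fun f => PySem.Str.startswith f "shape:")) (fun x => x) false with
  | [] => d
  | s :: _ =>
    match d.get? s with
    | none => d.insert s p.1
    | some prev =>
      if keyIdxA cfs prev < sigA p.2 ++ [PySem.List.len p.2, -p.1] then d.insert s p.1 else d

def select_shape_seed_indices_py (candidate_feature_sets : List (List String)) (num_samples : Int) : List Int :=
  let d := (PySem.List.enumerate candidate_feature_sets 0).foldl (stepA candidate_feature_sets) PySem.Dict.empty
  let seeded := (PySem.List.sorted d.items
      (fun item => keyIdxA candidate_feature_sets item.2) true).map (fun item => item.2)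
  PySem.List.slice seeded none (some num_samples)

-- ===== PORT B =====
def markerTableB : List (Int × List String) :=
  [(5, [":min:", ":max:"]),
   (4, [":negative:", ":positive:", ":zero:"]),
   (3, [":lower_half:", ":upper_half:"]),
   (2, [":interior:", ":even:", ":odd:"]),
   (1, [":value:"])]

-- B's table-driven _feature_priority (the for-loop with early return is findSome?)
def featPriorityB (feature : String) : Int :=
  if PySem.Str.startswith feature "shape:" then 6
  else
    (markerTableB.findSome? (fun pm =>
      if pm.2.any (fun m => PySem.Str.isIn m feature) then some pm.1 else none)).getD 0

-- B's _priority_signature: signature[6 - priority] += 1 (built already reversed, no final reverse)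
def sigB (features : List String) : List Int :=
  features.foldl
    (fun signature feature =>
      PySem.List.pySetD signature (6 - featPriorityB feature)
        (PySem.List.pyGetD signature (6 - featPriorityB feature) 0 + 1))
    (List.replicate 7 (0 : Int))

def keyIdxB (cfs : List (List String)) (i : Int) : List Int :=
  sigB (PySem.List.pyGetD cfs i []) ++ [PySem.List.len (PySem.List.pyGetD cfs i []), -i]

def select_shape_seed_indices_py_alt (candidate_feature_sets : List (List String)) (num_samples : Int) : List Int :=
  -- collect (index, minimal shape feature) with a running string-minimum
  let order := (PySem.List.enumerate candidate_feature_sets 0).foldl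
    (fun acc p =>
      match p.2.foldl
          (fun shape feature =>
            if PySem.Str.startswith feature "shape:" &&
                (match shape with | none => true | some s => decide (feature < s))
              then some feature else shape)
          none with
      | none => acc
      | some shape => acc ++ [(p.1, shape)]) []
  -- one global reverse sort of all shape-bearing candidates by the quality key
  let order' := PySem.List.sorted order (fun pair => keyIdxB candidate_feature_sets pair.1) true
  -- single dedup scan: keep the first (= best) index seen for each shape
  let scanned := order'.foldl
    (fun st p => if PySem.Set.contains st.1 p.2 then st else (PySem.Set.add st.1 p.2, st.2 ++ [p.1]))
    ((PySem.Set.empty : PySem.Set String), ([] : List Int))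
  PySem.List.slice scanned.2 none (some num_samples)

-- ===== PRECONDITION & SPEC =====
def Spec_select_shape_seed_indices_py (candidate_feature_sets : List (List String)) (num_samples : Int) (out : List Int) : Prop := out = select_shape_seed_indices_py_alt candidate_feature_sets num_samples
instance (candidate_feature_sets : List (List String)) (num_samples : Int) (out : List Int) : Decidable (Spec_select_shape_seed_indices_py candidate_feature_sets num_samples out) := by unfold Spec_select_shape_seed_indices_py; infer_instance

-- ===== CLAIM (what is proved, stated in full; the proofs are below) =====
def Claim_equal_select_shape_seed_indices_py : Prop := ∀ (candidate_feature_sets : List (List String)) (num_samples : Int), Dom_select_shape_seed_indices_py candidate_feature_sets num_samples → Spec_select_shape_seed_indices_py candidate_feature_sets num_samples (select_shape_seed_indices_py candidate_feature_sets num_samples)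

-- ===== LEMMAS AND PROOFS =====

-- the two _feature_priority implementations agree
theorem featPriority_eq (f : String) : featPriorityA f = featPriorityB f := by
  unfold featPriorityA featPriorityB markerTableB
  simp only [List.findSome?_cons, List.any_cons, List.any_nil, Bool.or_false]
  split_ifs <;> simp_all

-- the priority is one of 0..6
theorem featPriorityA_bounds (f : String) : 0 ≤ featPriorityA f ∧ featPriorityA f < 7 := by
  unfold featPriorityA; split_ifs <;> omega

-- a counting fold over a 7-slot vector keeps the length (g is the slot function)
theorem counts_length (g : String → Int) (fs : List String) (v : List Int) :
    (fs.foldl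
      (fun counts f =>
        PySem.List.pySetD counts (g f)
          (PySem.List.pyGetD counts (g f) 0 + 1)) v).length = v.length := by
  induction fs generalizing v with
  | nil => rfl
  | cons f t ih => rw [List.foldl_cons, ih, PySem.List.length_pySetD]

-- the counting fold counts occurrences of each slot
theorem counts_getD (g : String → Int) (hb : ∀ f, 0 ≤ g f ∧ g f < 7)
    (fs : List String) (v : List Int) (hv : v.length = 7) (j : Nat) (hj : j < 7) :
    ((fs.foldl
      (fun counts f =>
        PySem.List.pySetD counts (g f)
          (PySem.List.pyGetD counts (g f) 0 + 1)) v).getD j 0)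
      = v.getD j 0 + (fs.countP (fun f => g f == (j : Int)) : Int) := by
  induction fs generalizing v with
  | nil => simp
  | cons f t ih =>
    obtain ⟨h0, h7⟩ := hb f
    rw [List.foldl_cons, ih _ (by rw [PySem.List.length_pySetD]; exact hv),
      PySem.List.pySetD_of_nonneg _ _ h0,
      PySem.List.pyGetD_eq_getElem v 0 h0 (by rw [hv]; exact_mod_cast h7),
      List.countP_cons]
    by_cases hc : (g f).toNat = j
    · have hcb : (g f == (j : Int)) = true := by
        simp only [beq_iff_eq]; omega
      have hlt : j < v.length := by omega
      subst hc
      rw [hcb]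
      simp only [List.getD_eq_getElem?_getD, List.getElem?_set,
        List.getElem?_eq_getElem hlt, if_pos hlt, Option.getD_some]
      simp
      ring
    · have hcb : (g f == (j : Int)) = false := by
        simp only [beq_eq_false_iff_ne]; omega
      simp [List.getD_eq_getElem?_getD, hc, hcb]

-- the counts vector, spelt out
theorem counts_list (g : String → Int) (hb : ∀ f, 0 ≤ g f ∧ g f < 7) (fs : List String) :
    fs.foldl
      (fun counts f =>
        PySem.List.pySetD counts (g f)
          (PySem.List.pyGetD counts (g f) 0 + 1))
      (List.replicate 7 (0 : Int))
    = [(fs.countP (fun f => g f == 0) : Int),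
       (fs.countP (fun f => g f == 1) : Int),
       (fs.countP (fun f => g f == 2) : Int),
       (fs.countP (fun f => g f == 3) : Int),
       (fs.countP (fun f => g f == 4) : Int),
       (fs.countP (fun f => g f == 5) : Int),
       (fs.countP (fun f => g f == 6) : Int)] := by
  apply List.ext_getElem
  · rw [counts_length]; rfl
  · intro i h1 h2
    have h7 : i < 7 := by rw [counts_length] at h1; simpa using h1
    have hgd := counts_getD g hb fs (List.replicate 7 0) (by simp) i h7
    rw [List.getD_eq_getElem?_getD, List.getElem?_eq_getElem h1] at hgd
    simp only [Option.getD_some] at hgd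
    rw [hgd]
    interval_cases i <;> simp

theorem beq_flip (x j : Int) : ((6 - x) == j) = (x == (6 - j)) := by
  by_cases h : 6 - x = j
  · have h2 : x = 6 - j := by omega
    simp [h2]
  · have h2 : x ≠ 6 - j := by omega
    simp [h, h2]

theorem sig_eq (fs : List String) : sigA fs = sigB fs := by
  have hbB : ∀ f, 0 ≤ 6 - featPriorityB f ∧ 6 - featPriorityB f < 7 := by
    intro f
    have := featPriorityA_bounds f
    rw [featPriority_eq] at this
    omega
  have hflip : ∀ (j : Int), fs.countP (fun f => (6 - featPriorityB f) == j)
      = fs.countP (fun f => featPriorityA f == (6 - j)) := by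
    intro j
    apply List.countP_congr
    intro f _
    rw [featPriority_eq, beq_flip]
  unfold sigA sigB
  rw [counts_list featPriorityA featPriorityA_bounds,
      counts_list (fun f => 6 - featPriorityB f) hbB]
  simp only [List.reverse_cons]
  rw [hflip 0, hflip 1, hflip 2, hflip 3, hflip 4, hflip 5, hflip 6]
  norm_num

theorem sigA_length (fs : List String) : (sigA fs).length = 7 := by
  unfold sigA; rw [List.length_reverse, counts_length]; rfl

theorem keyIdx_eq (cfs : List (List String)) : keyIdxA cfs = keyIdxB cfs := by
  funext i; unfold keyIdxA keyIdxB; rw [sig_eq]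

theorem keyIdxA_inj (cfs : List (List String)) : Function.Injective (keyIdxA cfs) := by
  intro i j h
  have h8 : ∀ (x : Int), (keyIdxA cfs x).getD 8 0 = -x := by
    intro x
    unfold keyIdxA
    rw [List.getD_eq_getElem?_getD, List.getElem?_append_right (by rw [sigA_length]; omega)]
    simp [sigA_length]
  have := h8 i
  rw [h, h8 j] at this
  omega

-- sorted(xs)[0] is min(xs) (String values)
theorem head_sorted_eq_min? (xs : List String) :
    (PySem.List.sorted xs (fun x => x) false).head? = PySem.List.min? xs (fun x => x) := by
  cases hs : PySem.List.sorted xs (fun x => x) false with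
  | nil =>
    have : xs = [] := (PySem.List.sorted_eq_nil_iff xs _ false).1 hs
    subst this
    rfl
  | cons m t =>
    have hm : m ∈ xs := by
      rw [← PySem.List.mem_sorted xs (fun x => x) false, hs]; exact List.mem_cons_self
    have hne : xs ≠ [] := by rintro rfl; simp at hm
    cases hmin : PySem.List.min? xs (fun x => x) with
    | none => exact absurd ((PySem.List.min?_eq_none_iff xs _).1 hmin) hne
    | some m' =>
      have h1 : m ≤ m' := PySem.List.key_head_sorted_le xs (fun x => x) hs m' (PySem.List.min?_mem hmin)
      have h2 : m' ≤ m := PySem.List.min?_isMin hmin m hm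
      simp [le_antisymm h1 h2]

theorem sorted_inst_irrel {α κ : Type} [LT κ] (d1 d2 : DecidableLT κ) (xs : List α)
    (key : α → κ) (rev : Bool) :
    @PySem.List.sorted α κ _ d1 xs key rev = @PySem.List.sorted α κ _ d2 xs key rev := by
  congr 1

-- sorting pairs by a key of the index then projecting = projecting then sorting by that key
theorem sorted_map_snd (cfs : List (List String)) (items : List (String × Int)) :
    (PySem.List.sorted items (fun it => keyIdxA cfs it.2) true).map (fun it => it.2)
      = PySem.List.sorted (items.map (fun it => it.2)) (keyIdxA cfs) true := by
  rw [sorted_inst_irrel _ (LinearOrder.toDecidableLT) items,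
      sorted_inst_irrel _ (LinearOrder.toDecidableLT) (items.map (fun it => it.2))]
  refine List.reverse_inj.1
    (PySem.List.eq_of_perm_of_pairwise_le_of_injective (keyIdxA cfs) (keyIdxA_inj cfs) ?_ ?_ ?_)
  · exact (List.reverse_perm _).trans
      ((((@PySem.List.sorted_perm (String × Int) (List Int) _ LinearOrder.toDecidableLT items
            (fun it => keyIdxA cfs it.2) true).map (fun it => it.2)).trans
        (@PySem.List.sorted_perm Int (List Int) _ LinearOrder.toDecidableLT
            (items.map (fun it => it.2)) (keyIdxA cfs) true).symm).trans
        (List.reverse_perm _).symm)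
  · exact List.pairwise_reverse.2
      (List.Pairwise.map (S := fun (a b : Int) => keyIdxA cfs b ≤ keyIdxA cfs a)
        (fun (it : String × Int) => it.2) (fun _ _ h => h)
        (PySem.List.sorted_pairwise_rev items (fun it => keyIdxA cfs it.2)))
  · exact List.pairwise_reverse.2
      (PySem.List.sorted_pairwise_rev (items.map (fun it => it.2)) (keyIdxA cfs))

-- enumerate members are exactly the indexable elements
theorem enum_getD (cfs : List (List String)) {p : Int × List String}
    (hp : p ∈ PySem.List.enumerate cfs 0) : PySem.List.pyGetD cfs p.1 [] = p.2 := by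
  obtain ⟨j, hj, rfl⟩ := (PySem.List.mem_enumerate_iff cfs 0 p).1 hp
  show PySem.List.pyGetD cfs ((0 : Int) + j) [] = cfs[j]
  rw [zero_add, PySem.List.pyGetD_natCast, List.getD_eq_getElem?_getD,
    List.getElem?_eq_getElem hj]
  rfl

-- ---- proof-side views of the data ----

-- the minimal shape feature of a feature set (none = no shape feature)
def minSh (fs : List String) : Option String :=
  PySem.List.min? (fs.filter (fun f => PySem.Str.startswith f "shape:")) (fun x => x)

-- the (index, minimal shape) pairs, in index order
def pairsOf (cfs : List (List String)) : List (Int × String) :=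
  (PySem.List.enumerate cfs 0).filterMap (fun p => (minSh p.2).map (fun s => (p.1, s)))

-- the indices sharing a given minimal shape, in index order
def groupOf (cfs : List (List String)) (s : String) : List Int :=
  ((pairsOf cfs).filter (fun q => q.2 == s)).map (fun q => q.1)

def dictA (cfs : List (List String)) : PySem.Dict String Int :=
  (PySem.List.enumerate cfs 0).foldl (stepA cfs) PySem.Dict.empty

def LB (cfs : List (List String)) : List (Int × String) :=
  @PySem.List.sorted (Int × String) (List Int) _ LinearOrder.toDecidableLT
    (pairsOf cfs) (fun q => keyIdxA cfs q.1) true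

-- the streaming running-max step A performs per shape
def mstep (cfs : List (List String)) (acc : Option Int) (i : Int) : Option Int :=
  match acc with
  | none => some i
  | some m => if keyIdxA cfs m < keyIdxA cfs i then some i else some m

-- the dedup scan (recursive view of B's fold)
def scanR : List (Int × String) → PySem.Set String → List Int
  | [], _ => []
  | p :: t, seen =>
    if PySem.Set.contains seen p.2 then scanR t seen
    else p.1 :: scanR t (PySem.Set.add seen p.2)

def firstWith (L : List (Int × String)) (s : String) : Option Int :=
  (L.find? (fun q => q.2 == s)).map (fun q => q.1)

-- ---- B's pieces equal the proof-side views ----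

-- the running string-minimum over a list = min? of its shape features
theorem runMin_eq (fs : List String) : ∀ (acc : Option String),
    fs.foldl
      (fun shape feature =>
        if PySem.Str.startswith feature "shape:" &&
            (match shape with | none => true | some s => decide (feature < s))
          then some feature else shape) acc
    = (fs.filter (fun f => PySem.Str.startswith f "shape:")).foldl
        (fun acc x =>
          match acc with
          | none => some x
          | some m => if x < m then some x else some m) acc := by
  induction fs with
  | nil => intro acc; rfl
  | cons f t ih =>
    intro acc
    by_cases hf : PySem.Str.startswith f "shape:" = true
    · simp only [List.foldl_cons, List.filter_cons, hf, if_true, Bool.true_and]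
      rw [ih]
      congr 1
      cases acc with
      | none => simp
      | some m => by_cases h : f < m <;> simp [h]
    · have hf' : PySem.Str.startswith f "shape:" = false := by simpa using hf
      simp only [List.foldl_cons, List.filter_cons, hf', Bool.false_and]
      exact ih acc

theorem runMin_eq_minSh (fs : List String) :
    fs.foldl
      (fun shape feature =>
        if PySem.Str.startswith feature "shape:" &&
            (match shape with | none => true | some s => decide (feature < s))
          then some feature else shape) none
    = minSh fs := by
  rw [runMin_eq]
  unfold minSh PySem.List.min?
  congr 1
  funext acc x
  cases acc with
  | none => rfl
  | some m => by_cases h : x < m <;> simp [h]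

-- B's order-building fold is pairsOf
theorem orderB_eq_aux (l : List (Int × List String)) : ∀ (acc : List (Int × String)),
    l.foldl
      (fun acc p =>
        match p.2.foldl
            (fun shape feature =>
              if PySem.Str.startswith feature "shape:" &&
                  (match shape with | none => true | some s => decide (feature < s))
                then some feature else shape) none with
        | none => acc
        | some shape => acc ++ [(p.1, shape)]) acc
    = acc ++ l.filterMap (fun p => (minSh p.2).map (fun s => (p.1, s))) := by
  induction l with
  | nil => intro acc; simp
  | cons p t ih =>
    intro acc
    rw [List.foldl_cons, List.filterMap_cons, runMin_eq_minSh]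
    cases hmin : minSh p.2 with
    | none => exact ih acc
    | some s => rw [Option.map_some, ih]; simp

-- B's scan fold is scanR
theorem scan_foldl (L : List (Int × String)) : ∀ (seen : PySem.Set String) (res : List Int),
    (L.foldl
      (fun st p =>
        if PySem.Set.contains st.1 p.2 then st else (PySem.Set.add st.1 p.2, st.2 ++ [p.1]))
      (seen, res)).2
    = res ++ scanR L seen := by
  induction L with
  | nil => intro seen res; simp [scanR]
  | cons p t ih =>
    intro seen res
    rw [List.foldl_cons]
    by_cases hc : PySem.Set.contains seen p.2
    · simp only [hc, if_true]
      rw [ih, scanR, if_pos hc]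
    · simp only [hc]
      rw [ih, scanR, if_neg hc]
      simp

-- ---- A's dict characterised as a per-shape running max ----

theorem minSh_eq_head_sorted (fs : List String) :
    minSh fs = (PySem.List.sorted (fs.filter
      (fun f => PySem.Str.startswith f "shape:")) (fun x => x) false).head? := by
  rw [head_sorted_eq_min?]; rfl

theorem stepA_eq_none (cfs : List (List String)) (d : PySem.Dict String Int)
    (p : Int × List String) (hmin : minSh p.2 = none) : stepA cfs d p = d := by
  unfold stepA
  rw [minSh_eq_head_sorted] at hmin
  cases hsort : PySem.List.sorted (p.2.filter (fun f => PySem.Str.startswith f "shape:"))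
      (fun x => x) false with
  | nil => rfl
  | cons s rest => rw [hsort] at hmin; simp at hmin

theorem stepA_eq_some (cfs : List (List String)) (d : PySem.Dict String Int)
    (p : Int × List String) (hp : PySem.List.pyGetD cfs p.1 [] = p.2) {s0 : String}
    (hmin : minSh p.2 = some s0) :
    stepA cfs d p
      = match d.get? s0 with
        | none => d.insert s0 p.1
        | some prev =>
          if keyIdxA cfs prev < keyIdxA cfs p.1 then d.insert s0 p.1 else d := by
  unfold stepA
  rw [minSh_eq_head_sorted] at hmin
  have hkey : sigA p.2 ++ [PySem.List.len p.2, -p.1] = keyIdxA cfs p.1 := by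
    unfold keyIdxA; rw [hp]
  cases hsort : PySem.List.sorted (p.2.filter (fun f => PySem.Str.startswith f "shape:"))
      (fun x => x) false with
  | nil => rw [hsort] at hmin; simp at hmin
  | cons s rest =>
    rw [hsort] at hmin
    simp only [List.head?_cons, Option.some_inj] at hmin
    rw [hmin, hkey]

theorem foldA_get? (cfs : List (List String)) (l : List (Int × List String))
    (hl : ∀ p ∈ l, PySem.List.pyGetD cfs p.1 [] = p.2) :
    ∀ (d : PySem.Dict String Int) (s : String),
    ((l.foldl (stepA cfs) d).get? s)
      = (((l.filterMap (fun p => (minSh p.2).map (fun t => (p.1, t)))).filter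
            (fun q => q.2 == s)).map (fun q => q.1)).foldl (mstep cfs) (d.get? s) := by
  induction l with
  | nil => intro d s; rfl
  | cons p t ih =>
    intro d s
    have hp := hl p List.mem_cons_self
    have ht : ∀ q ∈ t, PySem.List.pyGetD cfs q.1 [] = q.2 :=
      fun q hq => hl q (List.mem_cons_of_mem _ hq)
    rw [List.foldl_cons, List.filterMap_cons]
    cases hmin : minSh p.2 with
    | none => rw [stepA_eq_none cfs d p hmin]; exact ih ht d s
    | some s0 =>
      rw [stepA_eq_some cfs d p hp hmin, Option.map_some, List.filter_cons]
      by_cases hss : s0 = s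
      · subst hss
        rw [if_pos (by simp), List.map_cons, List.foldl_cons, ih ht]
        congr 1
        cases hd : d.get? s0 with
        | none => simp [mstep, PySem.Dict.get?_insert_self]
        | some prev =>
          simp only [mstep]
          by_cases hk : keyIdxA cfs prev < keyIdxA cfs p.1
          · simp [hk, PySem.Dict.get?_insert_self]
          · simp [hk, hd]
      · rw [if_neg (by simp [hss]), ih ht]
        congr 1
        have hne : s ≠ s0 := fun h => hss h.symm
        cases hd : d.get? s0 with
        | none => simp [PySem.Dict.get?_insert_of_ne _ _ hne]
        | some prev =>
          by_cases hk : keyIdxA cfs prev < keyIdxA cfs p.1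
          · simp [hk, PySem.Dict.get?_insert_of_ne _ _ hne]
          · simp [hk]

theorem max?_inst_irrel {α κ : Type} [LT κ] (d1 d2 : DecidableLT κ) (xs : List α) (key : α → κ) :
    @PySem.List.max? α κ _ d1 xs key = @PySem.List.max? α κ _ d2 xs key := by
  congr 1

theorem mstep_eq_max? (cfs : List (List String)) (g : List Int) :
    g.foldl (mstep cfs) none = PySem.List.max? g (keyIdxA cfs) := by
  unfold PySem.List.max?
  congr 1
  funext acc i
  cases acc with
  | none => rfl
  | some m => by_cases h : keyIdxA cfs m < keyIdxA cfs i <;> simp [mstep, h]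

theorem dictA_get? (cfs : List (List String)) (s : String) :
    (dictA cfs).get? s = PySem.List.max? (groupOf cfs s) (keyIdxA cfs) := by
  unfold dictA
  rw [foldA_get? cfs _ (fun p hp => enum_getD cfs hp), PySem.Dict.get?_empty]
  exact mstep_eq_max? cfs _

theorem dictA_keys_nodup (cfs : List (List String)) : (dictA cfs).keys.Nodup := by
  unfold dictA
  have hstep : ∀ (d : PySem.Dict String Int) (p : Int × List String),
      d.keys.Nodup → (stepA cfs d p).keys.Nodup := by
    intro d p hd
    unfold stepA
    split
    · exact hd
    · split
      · exact PySem.Dict.nodup_keys_insert _ _ _ hd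
      · split
        · exact PySem.Dict.nodup_keys_insert _ _ _ hd
        · exact hd
  have : ∀ (l : List (Int × List String)) (d : PySem.Dict String Int),
      d.keys.Nodup → (l.foldl (stepA cfs) d).keys.Nodup := by
    intro l
    induction l with
    | nil => intro d hd; exact hd
    | cons p t ih => intro d hd; rw [List.foldl_cons]; exact ih _ (hstep d p hd)
  exact this _ _ PySem.Dict.nodup_keys_empty

-- ---- structure of pairsOf ----

theorem filterMap_fst_sublist (l : List (Int × List String)) :
    ((l.filterMap (fun p => (minSh p.2).map (fun s => (p.1, s)))).map (fun q => q.1)).Sublist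
      (l.map (fun q => q.1)) := by
  induction l with
  | nil => simp
  | cons p t ih =>
    rw [List.filterMap_cons, List.map_cons]
    cases minSh p.2 with
    | none => exact ih.cons _
    | some s => rw [Option.map_some, List.map_cons]; exact ih.cons₂ _

theorem pairs_fst_pairwise (cfs : List (List String)) :
    ((pairsOf cfs).map (fun q => q.1)).Pairwise (· < ·) := by
  unfold pairsOf
  exact List.Pairwise.sublist (filterMap_fst_sublist _)
    (List.pairwise_map.2 (PySem.List.pairwise_lt_enumerate cfs 0))

theorem pairs_fst_nodup (cfs : List (List String)) :
    ((pairsOf cfs).map (fun q => q.1)).Nodup :=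
  (pairs_fst_pairwise cfs).imp (fun h => Int.ne_of_lt h)

theorem pairs_snd_eq (cfs : List (List String)) {i : Int} {s : String}
    (h : (i, s) ∈ pairsOf cfs) : minSh (PySem.List.pyGetD cfs i []) = some s := by
  unfold pairsOf at h
  obtain ⟨p, hp, hmap⟩ := List.mem_filterMap.1 h
  cases hmin : minSh p.2 with
  | none => rw [hmin] at hmap; simp at hmap
  | some s' =>
    rw [hmin, Option.map_some, Option.some_inj] at hmap
    have h1 : p.1 = i := congrArg Prod.fst hmap
    have h2 : s' = s := congrArg Prod.snd hmap
    rw [← h1, enum_getD cfs hp, hmin, h2]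

theorem pairs_shape_unique (cfs : List (List String)) {i : Int} {s s' : String}
    (h1 : (i, s) ∈ pairsOf cfs) (h2 : (i, s') ∈ pairsOf cfs) : s = s' := by
  have e1 := pairs_snd_eq cfs h1
  have e2 := pairs_snd_eq cfs h2
  rw [e1] at e2
  exact Option.some_inj.1 e2

theorem mem_groupOf (cfs : List (List String)) (s : String) (i : Int) :
    i ∈ groupOf cfs s ↔ (i, s) ∈ pairsOf cfs := by
  unfold groupOf
  constructor
  · intro h
    obtain ⟨q, hq, hqi⟩ := List.mem_map.1 h
    obtain ⟨hqm, hqs⟩ := List.mem_filter.1 hq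
    have : q = (i, s) := by
      obtain ⟨a, b⟩ := q
      simp only [beq_iff_eq] at hqs
      simp only at hqi
      rw [hqi, hqs]
    rwa [this] at hqm
  · intro h
    exact List.mem_map.2 ⟨(i, s), List.mem_filter.2 ⟨h, by simp⟩, rfl⟩

-- ---- values of A's dict ----

theorem mem_values_iff (d : PySem.Dict String Int) (hnd : d.keys.Nodup) (i : Int) :
    i ∈ d.values ↔ ∃ s, d.get? s = some i := by
  show i ∈ d.items.map (fun q => q.2) ↔ _
  constructor
  · intro h
    obtain ⟨q, hq, hqi⟩ := List.mem_map.1 h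
    refine ⟨q.1, ?_⟩
    rw [← hqi]
    exact PySem.Dict.get?_of_mem_items _ hq hnd
  · rintro ⟨s, hs⟩
    exact List.mem_map.2 ⟨(s, i), PySem.Dict.mem_items_of_get?_eq_some _ hs, rfl⟩

theorem dictA_values_nodup (cfs : List (List String)) : (dictA cfs).values.Nodup := by
  have hnd := dictA_keys_nodup cfs
  have hitems : (dictA cfs).items.Nodup := by
    have : ((dictA cfs).items.map (fun q => q.1)).Nodup := hnd
    exact this.of_map _
  show ((dictA cfs).items.map (fun q => q.2)).Nodup
  apply List.Nodup.map_on _ hitems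
  intro x hx y hy hxy
  have hgx : (dictA cfs).get? x.1 = some x.2 := by
    have : (x.1, x.2) ∈ (dictA cfs).items := by simpa using hx
    exact PySem.Dict.get?_of_mem_items _ this hnd
  have hgy : (dictA cfs).get? y.1 = some y.2 := by
    have : (y.1, y.2) ∈ (dictA cfs).items := by simpa using hy
    exact PySem.Dict.get?_of_mem_items _ this hnd
  rw [dictA_get?] at hgx hgy
  have hmx : x.2 ∈ groupOf cfs x.1 := PySem.List.max?_mem hgx
  have hmy : y.2 ∈ groupOf cfs y.1 := PySem.List.max?_mem hgy
  have hpx := (mem_groupOf cfs x.1 x.2).1 hmx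
  have hpy := (mem_groupOf cfs y.1 y.2).1 hmy
  rw [hxy] at hpx
  have : x.1 = y.1 := pairs_shape_unique cfs hpx hpy
  obtain ⟨a, b⟩ := x
  obtain ⟨c, e⟩ := y
  simp only at hxy this
  rw [hxy, this]

-- ---- the dedup scan ----

theorem set_contains_iff (seen : PySem.Set String) (x : String) :
    PySem.Set.contains seen x = true ↔ x ∈ seen := by
  simp [PySem.Set.contains]

theorem scanR_mem (L : List (Int × String)) : ∀ (seen : PySem.Set String) (i : Int),
    i ∈ scanR L seen ↔ ∃ s, s ∉ seen ∧ firstWith L s = some i := by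
  induction L with
  | nil => intro seen i; simp [scanR, firstWith]
  | cons p t ih =>
    intro seen i
    by_cases hc : p.2 ∈ seen
    · have hcb : PySem.Set.contains seen p.2 = true := (set_contains_iff _ _).2 hc
      rw [scanR, if_pos hcb, ih]
      constructor
      · rintro ⟨s, hs, hf⟩
        refine ⟨s, hs, ?_⟩
        have hne : ¬ ((fun q : Int × String => q.2 == s) p = true) := by
          simp only [beq_iff_eq]
          intro h; exact hs (h ▸ hc)
        rw [firstWith, List.find?_cons_of_neg (p := fun q : Int × String => q.2 == s) (a := p) hne]
        exact hf
      · rintro ⟨s, hs, hf⟩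
        have hne : ¬ ((fun q : Int × String => q.2 == s) p = true) := by
          simp only [beq_iff_eq]
          intro h; exact hs (h ▸ hc)
        rw [firstWith, List.find?_cons_of_neg (p := fun q : Int × String => q.2 == s) (a := p) hne] at hf
        exact ⟨s, hs, hf⟩
    · have hcb : ¬ PySem.Set.contains seen p.2 = true := fun h => hc ((set_contains_iff _ _).1 h)
      rw [scanR, if_neg hcb]
      simp only [List.mem_cons]
      rw [ih]
      constructor
      · rintro (rfl | ⟨s, hs, hf⟩)
        · refine ⟨p.2, hc, ?_⟩
          rw [firstWith, List.find?_cons_of_pos (p := fun q : Int × String => q.2 == p.2) (a := p) (by simp)]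
          rfl
        · have hs2 : s ∉ seen ∧ s ≠ p.2 := by
            constructor
            · intro h; exact hs ((PySem.Set.mem_add seen p.2 s).2 (Or.inl h))
            · intro h; exact hs ((PySem.Set.mem_add seen p.2 s).2 (Or.inr h))
          refine ⟨s, hs2.1, ?_⟩
          have hne : ¬ ((fun q : Int × String => q.2 == s) p = true) := by
            simp only [beq_iff_eq]
            exact fun h => hs2.2 h.symm
          rw [firstWith, List.find?_cons_of_neg (p := fun q : Int × String => q.2 == s) (a := p) hne]
          exact hf
      · rintro ⟨s, hs, hf⟩
        by_cases hsp : s = p.2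
        · subst hsp
          rw [firstWith, List.find?_cons_of_pos (p := fun q : Int × String => q.2 == p.2) (a := p) (by simp)] at hf
          left
          exact (Option.some_inj.1 hf).symm
        · right
          refine ⟨s, ?_, ?_⟩
          · intro h
            rcases (PySem.Set.mem_add seen p.2 s).1 h with h' | h'
            · exact hs h'
            · exact hsp h'
          · have hne : ¬ ((fun q : Int × String => q.2 == s) p = true) := by
              simp only [beq_iff_eq]
              exact fun h => hsp h.symm
            rw [firstWith, List.find?_cons_of_neg (p := fun q : Int × String => q.2 == s) (a := p) hne] at hf
            exact hf

theorem scanR_sublist (L : List (Int × String)) : ∀ (seen : PySem.Set String),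
    (scanR L seen).Sublist (L.map (fun q => q.1)) := by
  induction L with
  | nil => intro seen; simp [scanR]
  | cons p t ih =>
    intro seen
    rw [scanR, List.map_cons]
    by_cases hc : PySem.Set.contains seen p.2
    · rw [if_pos hc]; exact (ih seen).cons _
    · rw [if_neg hc]; exact (ih _).cons₂ _

-- the sorted list is weakly descending on the key of the index
theorem LB_fst_pairwise (cfs : List (List String)) :
    ((LB cfs).map (fun q => q.1)).Pairwise (fun a b => keyIdxA cfs b ≤ keyIdxA cfs a) := by
  unfold LB
  rw [sorted_inst_irrel _ LinearOrder.toDecidableLT]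
  exact List.Pairwise.map (S := fun (a b : Int) => keyIdxA cfs b ≤ keyIdxA cfs a)
    (fun (q : Int × String) => q.1) (fun _ _ h => h)
    (PySem.List.sorted_pairwise_rev (pairsOf cfs) (fun q => keyIdxA cfs q.1))

-- ---- first per shape in the sorted list = max of the group ----

theorem first_eq_max (cfs : List (List String)) (s : String) :
    firstWith (LB cfs) s = PySem.List.max? (groupOf cfs s) (keyIdxA cfs) := by
  have hperm : (LB cfs).Perm (pairsOf cfs) :=
    @PySem.List.sorted_perm (Int × String) (List Int) _ LinearOrder.toDecidableLT
      (pairsOf cfs) (fun q => keyIdxA cfs q.1) true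
  have hmapperm : (((LB cfs).filter (fun q => q.2 == s)).map (fun q => q.1)).Perm
      (groupOf cfs s) := (hperm.filter _).map _
  rw [firstWith, ← List.head?_filter]
  cases hF : (LB cfs).filter (fun q => q.2 == s) with
  | nil =>
    have hg : groupOf cfs s = [] := by
      rw [hF, List.map_nil] at hmapperm
      exact List.perm_nil.1 hmapperm.symm
    rw [hg]
    rfl
  | cons q rest =>
    rw [hF] at hmapperm
    rw [List.map_cons] at hmapperm
    have hgne : groupOf cfs s ≠ [] := by
      intro h
      rw [h] at hmapperm
      exact List.cons_ne_nil _ _ (List.perm_nil.1 hmapperm)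
    obtain ⟨m, hm⟩ : ∃ m, PySem.List.max? (groupOf cfs s) (keyIdxA cfs) = some m := by
      cases hx : PySem.List.max? (groupOf cfs s) (keyIdxA cfs) with
      | none => exact absurd ((PySem.List.max?_eq_none_iff _ _).1 hx) hgne
      | some m => exact ⟨m, rfl⟩
    rw [hm]
    have hq1 : q.1 ∈ groupOf cfs s := hmapperm.mem_iff.1 List.mem_cons_self
    have hmL := hm
    rw [max?_inst_irrel _ LinearOrder.toDecidableLT] at hmL
    have hle1 : keyIdxA cfs q.1 ≤ keyIdxA cfs m := PySem.List.max?_isMax hmL _ hq1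
    have hmmem : m ∈ q.1 :: rest.map (fun q : Int × String => q.1) :=
      hmapperm.mem_iff.2 (PySem.List.max?_mem hm)
    have hpair : (q.1 :: rest.map (fun q : Int × String => q.1)).Pairwise
        (fun a b => keyIdxA cfs b ≤ keyIdxA cfs a) := by
      have h2 := LB_fst_pairwise cfs
      have h3 : (((LB cfs).filter (fun q : Int × String => q.2 == s)).map
          (fun q : Int × String => q.1)).Pairwise (fun a b => keyIdxA cfs b ≤ keyIdxA cfs a) :=
        List.Pairwise.sublist (List.Sublist.map _ List.filter_sublist) h2
      rw [hF, List.map_cons] at h3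
      exact h3
    have hle2 : keyIdxA cfs m ≤ keyIdxA cfs q.1 := by
      rcases List.mem_cons.1 hmmem with h | h
      · rw [h]
      · exact List.rel_of_pairwise_cons hpair h
    have : q.1 = m := keyIdxA_inj cfs (le_antisymm hle1 hle2)
    rw [List.head?_cons, Option.map_some, this]

-- ---- the winners lists agree ----

theorem winners_eq (cfs : List (List String)) :
    scanR (LB cfs) PySem.Set.empty
      = PySem.List.sorted (dictA cfs).values (keyIdxA cfs) true := by
  have hnd := dictA_keys_nodup cfs
  have hperm : (LB cfs).Perm (pairsOf cfs) :=
    @PySem.List.sorted_perm (Int × String) (List Int) _ LinearOrder.toDecidableLT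
      (pairsOf cfs) (fun q => keyIdxA cfs q.1) true
  have hvperm : (PySem.List.sorted (dictA cfs).values (keyIdxA cfs) true).Perm
      (dictA cfs).values := PySem.List.sorted_perm _ _ _
  have hmem : ∀ i, i ∈ scanR (LB cfs) PySem.Set.empty ↔
      i ∈ PySem.List.sorted (dictA cfs).values (keyIdxA cfs) true := by
    intro i
    rw [scanR_mem, hvperm.mem_iff, mem_values_iff _ hnd]
    constructor
    · rintro ⟨s, _, hf⟩
      refine ⟨s, ?_⟩
      rw [dictA_get?, ← first_eq_max]
      exact hf
    · rintro ⟨s, hg⟩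
      refine ⟨s, by simp [PySem.Set.empty], ?_⟩
      rw [first_eq_max, ← dictA_get?]
      exact hg
  have hLfst : ((LB cfs).map (fun q => q.1)).Nodup :=
    ((hperm.map _).nodup_iff).2 (pairs_fst_nodup cfs)
  have h1 : (scanR (LB cfs) PySem.Set.empty).Nodup :=
    (scanR_sublist _ _).nodup hLfst
  have h2 : (PySem.List.sorted (dictA cfs).values (keyIdxA cfs) true).Nodup :=
    (hvperm.nodup_iff).2 (dictA_values_nodup cfs)
  have hperm2 : (scanR (LB cfs) PySem.Set.empty).Perm
      (PySem.List.sorted (dictA cfs).values (keyIdxA cfs) true) :=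
    (List.perm_ext_iff_of_nodup h1 h2).2 hmem
  have hp1 : (scanR (LB cfs) PySem.Set.empty).Pairwise
      (fun a b => keyIdxA cfs b ≤ keyIdxA cfs a) :=
    List.Pairwise.sublist (scanR_sublist _ _) (LB_fst_pairwise cfs)
  have hp2 : (PySem.List.sorted (dictA cfs).values (keyIdxA cfs) true).Pairwise
      (fun a b => keyIdxA cfs b ≤ keyIdxA cfs a) := by
    rw [sorted_inst_irrel _ LinearOrder.toDecidableLT]
    exact PySem.List.sorted_pairwise_rev (dictA cfs).values (keyIdxA cfs)
  refine List.reverse_inj.1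
    (PySem.List.eq_of_perm_of_pairwise_le_of_injective (keyIdxA cfs) (keyIdxA_inj cfs) ?_ ?_ ?_)
  · exact (List.reverse_perm _).trans (hperm2.trans (List.reverse_perm _).symm)
  · exact List.pairwise_reverse.2 hp1
  · exact List.pairwise_reverse.2 hp2

-- ===== VERDICT (by name: the statement is the Claim_ definition above) =====
theorem select_shape_seed_indices_py_spec : Claim_equal_select_shape_seed_indices_py := by
  intro cfs ns _
  show select_shape_seed_indices_py cfs ns = select_shape_seed_indices_py_alt cfs ns
  unfold select_shape_seed_indices_py select_shape_seed_indices_py_alt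
  show PySem.List.slice
      ((PySem.List.sorted ((PySem.List.enumerate cfs 0).foldl (stepA cfs) PySem.Dict.empty).items
        (fun item => keyIdxA cfs item.2) true).map (fun item => item.2)) none (some ns)
    = PySem.List.slice
        (((PySem.List.sorted
            ((PySem.List.enumerate cfs 0).foldl
              (fun acc p =>
                match p.2.foldl
                    (fun shape feature =>
                      if PySem.Str.startswith feature "shape:" &&
                          (match shape with | none => true | some s => decide (feature < s))
                        then some feature else shape)
                    none with
                | none => acc
                | some shape => acc ++ [(p.1, shape)]) [])
            (fun pair => keyIdxB cfs pair.1) true).foldl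
          (fun st p =>
            if PySem.Set.contains st.1 p.2 then st else (PySem.Set.add st.1 p.2, st.2 ++ [p.1]))
          ((PySem.Set.empty : PySem.Set String), ([] : List Int))).2) none (some ns)
  rw [sorted_map_snd, orderB_eq_aux, List.nil_append, ← keyIdx_eq,
    sorted_inst_irrel _ LinearOrder.toDecidableLT
      ((PySem.List.enumerate cfs 0).filterMap (fun p => (minSh p.2).map (fun s => (p.1, s)))),
    scan_foldl, List.nil_append]
  show PySem.List.slice (PySem.List.sorted (dictA cfs).values (keyIdxA cfs) true) none (some ns)
    = PySem.List.slice (scanR (LB cfs) PySem.Set.empty) none (some ns)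
  rw [winners_eq]
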